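-- pv_equiv track=rewrite | github.com/CSC-101/programming-assignment-2-camilleabetong | hw2.py | validate_route
-- ===== SOURCE A (Python) =====
-- def validate_route(city_links: list[list[str]], route: list[str]) -> bool:
--     """
--     Purpose:
--     Validate if a given route is valid based on city links.
--
--     Input: Lists
--     Output: Boolean (True or False)
--
--     Parameters:
--     - city_links: A list of lists where each inner list contains city names that are directly connected.
--     - route: A list of city names representing the route from the first city to the last, including intermediate cities.
--
--     Returns:
--     True if the route is valid (i.e., there are links between consecutive cities), False otherwise.
--     """
--     connections = {}
--     for link in city_links:
--         for city in link:
--             if city not in connections: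
--                 connections[city] = set()
--             connections[city].update(link)
--             connections[city].remove(city)
--
--     for i in range(len(route) - 1):
--         if route[i + 1] not in connections.get(route[i], []):
--             return False
--
--     return True
-- ===== SOURCE B (Python) =====
-- def validate_route(city_links: list[list[str]], route: list[str]) -> bool:
--     return all(
--         any(u != v and u in link and v in link for link in city_links)
--         for u, v in zip(route, route[1:])
--     )
-- ===== Notes on version B (the rewrite author's own statement) =====
-- stated objective: simpler
-- what changed: Drops A's adjacency-dictionary-of-sets construction entirely: B checks each consecutive route pair directly against the raw city_links, requiring some link to contain both cities with the two cities distinct; this skips A's per-city set rebuild (quadratic in link size).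
import Mathlib
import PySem

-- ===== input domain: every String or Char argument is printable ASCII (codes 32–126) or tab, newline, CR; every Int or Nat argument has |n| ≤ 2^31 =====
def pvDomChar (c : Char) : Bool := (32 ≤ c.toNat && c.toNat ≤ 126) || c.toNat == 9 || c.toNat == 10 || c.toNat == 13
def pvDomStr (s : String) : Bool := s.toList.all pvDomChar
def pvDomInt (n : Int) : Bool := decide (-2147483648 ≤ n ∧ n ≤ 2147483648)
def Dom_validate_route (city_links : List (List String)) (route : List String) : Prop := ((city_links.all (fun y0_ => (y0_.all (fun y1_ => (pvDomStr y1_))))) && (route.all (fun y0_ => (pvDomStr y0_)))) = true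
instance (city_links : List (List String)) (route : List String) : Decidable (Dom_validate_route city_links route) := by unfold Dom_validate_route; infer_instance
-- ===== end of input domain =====

-- B drops A's adjacency-dict build and checks each consecutive pair directly against the raw links (simpler; same results).

-- ===== PORT A =====
-- inner loop body: 'if city not in connections: connections[city] = set()';
-- 'connections[city].update(link); connections[city].remove(city)' — city ∈ link here, so
-- Python's set.remove never raises; Set.discard is exact on these inputs.
def pvStepCity (link : List String) (conns : PySem.Dict String (PySem.Set String)) (city : String) :
    PySem.Dict String (PySem.Set String) :=
  let conns := if (conns.get? city).isNone then conns.insert city PySem.Set.empty else conns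
  conns.insert city (PySem.Set.discard (PySem.Set.update (conns.getD city PySem.Set.empty) link) city)

-- 'for city in link: …'
def pvProcLink (conns : PySem.Dict String (PySem.Set String)) (link : List String) :
    PySem.Dict String (PySem.Set String) :=
  link.foldl (pvStepCity link) conns

def validate_route (city_links : List (List String)) (route : List String) : Bool :=
  let connections := city_links.foldl pvProcLink PySem.Dict.empty
  -- 'for i in range(len(route)-1): if route[i+1] not in connections.get(route[i], []): return False / return True'
  (PySem.List.pyRange 0 ((route.length : Int) - 1) 1).all (fun i =>
    PySem.Set.contains (connections.getD (PySem.List.pyGetD route i "") PySem.Set.empty)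
      (PySem.List.pyGetD route (i + 1) ""))

-- ===== PORT B =====
def validate_route_alt (city_links : List (List String)) (route : List String) : Bool :=
  (route.zip (route.drop 1)).all (fun p =>
    city_links.any (fun link => p.1 != p.2 && link.contains p.1 && link.contains p.2))

-- ===== PRECONDITION & SPEC =====
def Spec_validate_route (city_links : List (List String)) (route : List String) (out : Bool) : Prop := out = validate_route_alt city_links route
instance (city_links : List (List String)) (route : List String) (out : Bool) : Decidable (Spec_validate_route city_links route out) := by unfold Spec_validate_route; infer_instance

-- ===== CLAIM (what is proved, stated in full; the proofs are below) =====
def Claim_equal_validate_route : Prop := ∀ (city_links : List (List String)) (route : List String), Dom_validate_route city_links route → Spec_validate_route city_links route (validate_route city_links route)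

-- ===== LEMMAS AND PROOFS =====

-- the derived lookup A's final loop performs
def pvLk (d : PySem.Dict String (PySem.Set String)) (u v : String) : Bool :=
  PySem.Set.contains (d.getD u PySem.Set.empty) v

theorem pvLk_empty (u v : String) : pvLk PySem.Dict.empty u v = false := rfl

theorem pvLk_step (link : List String) (d : PySem.Dict String (PySem.Set String)) (c u v : String) :
    pvLk (pvStepCity link d c) u v =
      if u = c then (pvLk d u v || link.contains v) && !(u == v) else pvLk d u v := by
  simp only [pvStepCity, pvLk]
  have hgc : ((if (d.get? c).isNone then d.insert c PySem.Set.empty else d).getD c PySem.Set.empty)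
      = d.getD c PySem.Set.empty := by
    split
    · rename_i h
      rw [PySem.Dict.getD_insert_self]
      unfold PySem.Dict.getD
      cases hq : d.get? c with
      | none => simp
      | some s => simp [hq] at h
    · rfl
  by_cases hu : u = c
  · subst hu
    rw [PySem.Dict.getD_insert_self, hgc, if_pos rfl]
    have hiff : v ∈ PySem.Set.discard (PySem.Set.update (d.getD u PySem.Set.empty) link) u
        ↔ (v ∈ d.getD u PySem.Set.empty ∨ v ∈ link) ∧ v ≠ u := by
      rw [PySem.Set.mem_discard, PySem.Set.mem_update]
    rw [Bool.eq_iff_iff]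
    simp only [PySem.Set.contains_iff, hiff, Bool.and_eq_true, Bool.or_eq_true,
      Bool.not_eq_true', beq_eq_false_iff_ne, List.contains_iff_mem]
    constructor
    · rintro ⟨h1, h2⟩; exact ⟨h1, Ne.symm h2⟩
    · rintro ⟨h1, h2⟩; exact ⟨h1, Ne.symm h2⟩
  · rw [if_neg hu]
    split
    · rw [PySem.Dict.getD_insert_of_ne _ _ _ hu, PySem.Dict.getD_insert_of_ne _ _ _ hu]
    · rw [PySem.Dict.getD_insert_of_ne _ _ _ hu]

theorem pvBoolAbsorb (a b n : Bool) : (((a || b) && n || b) && n) = ((a || b) && n) := by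
  cases a <;> cases b <;> cases n <;> rfl

theorem pvLk_foldl (link cs : List String) (d : PySem.Dict String (PySem.Set String)) (u v : String) :
    pvLk (cs.foldl (pvStepCity link) d) u v =
      if u ∈ cs then (pvLk d u v || link.contains v) && !(u == v) else pvLk d u v := by
  induction cs generalizing d with
  | nil => simp
  | cons c cs ih =>
    rw [List.foldl_cons, ih, pvLk_step]
    by_cases hm : u ∈ cs <;> by_cases he : u = c <;>
      simp [hm, he] <;> (intro _; exact pvBoolAbsorb _ _ _)

theorem pvLk_build (links : List (List String)) (d : PySem.Dict String (PySem.Set String))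
    (h0 : ∀ w, pvLk d w w = false) (u v : String) :
    pvLk (links.foldl pvProcLink d) u v =
      (pvLk d u v || links.any (fun l => u != v && l.contains u && l.contains v)) := by
  induction links generalizing d with
  | nil => simp
  | cons l ls ih =>
    rw [List.foldl_cons]
    have hpres : ∀ w, pvLk (pvProcLink d l) w w = false := by
      intro w
      unfold pvProcLink
      rw [pvLk_foldl]
      split
      · simp
      · exact h0 w
    rw [ih (pvProcLink d l) hpres]
    unfold pvProcLink
    rw [pvLk_foldl]
    by_cases hm : u ∈ l <;> by_cases he : u = v
    · subst he
      simp [hm, h0 u]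
    · have : (u == v) = false := by simp [he]
      simp [hm, this, bne, Bool.or_assoc]
    · subst he
      simp [h0 u, hm]
    · have hcu : l.contains u = false := by
        simp at hm ⊢; exact hm
      simp [hm, bne]

theorem pvAllPairsNat (r : List String) (f : String → String → Bool) :
    (List.range (r.length - 1)).all (fun k => f (r.getD k "") (r.getD (k + 1) "")) =
      (r.zip (r.drop 1)).all (fun p => f p.1 p.2) := by
  induction r with
  | nil => rfl
  | cons x xs ih =>
    cases xs with
    | nil => rfl
    | cons y ys =>
      have h1 : (x :: y :: ys).length - 1 = ys.length + 1 := by simp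
      rw [h1, List.range_succ_eq_map, List.all_cons]
      have h2 : ((List.range ys.length).map Nat.succ).all
            (fun k => f ((x :: y :: ys).getD k "") ((x :: y :: ys).getD (k + 1) ""))
          = (List.range ys.length).all
            (fun k => f ((y :: ys).getD k "") ((y :: ys).getD (k + 1) "")) := by
        rw [List.all_map]
        rfl
      rw [h2]
      have h3 := ih
      simp only [List.length_cons, Nat.add_sub_cancel, List.drop_one, List.tail_cons] at h3 ⊢
      rw [h3]
      rfl

theorem pvAllPairs (r : List String) (f : String → String → Bool) :
    ((PySem.List.pyRange 0 ((r.length : Int) - 1) 1).all (fun i =>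
        f (PySem.List.pyGetD r i "") (PySem.List.pyGetD r (i + 1) ""))) =
      (r.zip (r.drop 1)).all (fun p => f p.1 p.2) := by
  rw [PySem.List.pyRange_one, List.all_map, ← pvAllPairsNat r f]
  have hn : ((r.length : Int) - 1 - 0).toNat = r.length - 1 := by omega
  rw [hn]
  congr 1
  funext k
  have e2 : ((k : Int) + 1) = (((k + 1 : Nat)) : Int) := by push_cast; ring
  simp only [Function.comp, zero_add, e2, PySem.List.pyGetD_natCast]

-- ===== VERDICT (by name: the statement is the Claim_ definition above) =====
theorem validate_route_spec : Claim_equal_validate_route := by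
  intro cl r _
  unfold Spec_validate_route validate_route validate_route_alt
  have hlk : ∀ u v, pvLk (cl.foldl pvProcLink PySem.Dict.empty) u v =
      cl.any (fun l => u != v && l.contains u && l.contains v) := by
    intro u v
    rw [pvLk_build cl PySem.Dict.empty (fun w => pvLk_empty w w) u v, pvLk_empty]
    simp
  have := pvAllPairs r (fun u v => pvLk (cl.foldl pvProcLink PySem.Dict.empty) u v)
  simp only [pvLk] at this
  rw [this]
  congr 1
  funext p
  have := hlk p.1 p.2
  simpa [pvLk] using this
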